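-- pv_equiv track=rewrite | github.com/Runarok/GeeksForGeeks-solutions | Difficulty: Basic/Extract the integers/extract-the-integers.py | extractIntegerWords
-- ===== SOURCE A (Python) =====
-- def extractIntegerWords(s):
--     # Initialize an empty list to store numbers and a temporary string n to build numbers
--     num = []
--     n = ''
--
--     # Iterate through each character in the string
--     for i in s:
--         # If the character is a digit, append it to n
--         if i.isdigit():
--             n += i
--         # If the character is not a digit and n is not empty
--         # append the number n to the num list and reset n
--         elif n:
--             num.append(n)
--             n = ''
--
--     # After the loop, check if n is not empty (this handles the case when the string ends with a number)
--     if n: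
--         num.append(n)
--
--     # Return the list of extracted numbers
--     return num
-- ===== SOURCE B (Python) =====
-- from itertools import groupby
--
--
-- def extractIntegerWords(s):
--     return [''.join(g) for k, g in groupby(s, key=str.isdigit) if k]
-- ===== Notes on version B (the rewrite author's own statement) =====
-- stated objective: idiomatic
-- what changed: Replaced the manual character loop with its accumulator string and post-loop tail check by itertools.groupby keyed on str.isdigit, joining and keeping only the digit-run groups.
import Mathlib
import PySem

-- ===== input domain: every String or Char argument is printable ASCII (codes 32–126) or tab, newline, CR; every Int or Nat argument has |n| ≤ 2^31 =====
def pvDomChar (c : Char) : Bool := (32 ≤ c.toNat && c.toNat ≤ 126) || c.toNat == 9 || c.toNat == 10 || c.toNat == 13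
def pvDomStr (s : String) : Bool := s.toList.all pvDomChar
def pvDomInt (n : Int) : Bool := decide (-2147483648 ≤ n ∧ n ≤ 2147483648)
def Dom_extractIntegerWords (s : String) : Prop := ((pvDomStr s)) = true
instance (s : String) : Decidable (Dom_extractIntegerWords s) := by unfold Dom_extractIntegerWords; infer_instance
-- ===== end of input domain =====

-- B replaces A's manual accumulator-and-tail-check loop with run-grouping (itertools.groupby) over the characters; same cost, more idiomatic.

-- ===== PORT A =====
-- A's growing string n is modeled as a List Char built left-to-right (n += i ↦ n ++ [i]);
-- appending n to num ↦ String.ofList n; 'if n:' ↦ n ≠ [].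
def extractIntegerWords (s : String) : List String :=
  let st := s.toList.foldl
    (fun (st : List String × List Char) i =>
      if PySem.Chars.isdigit i then (st.1, st.2 ++ [i])
      else if st.2 ≠ [] then (st.1 ++ [String.ofList st.2], [])
      else st)
    ([], [])
  if st.2 ≠ [] then st.1 ++ [String.ofList st.2] else st.1

-- ===== PORT B =====
-- groupby(s, key=str.isdigit) transcribed as takeWhile/dropWhile run-splitting, keeping digit runs.
def pvGroupDigits : List Char → List String
  | [] => []
  | c :: cs =>
    if PySem.Chars.isdigit c then
      String.ofList (c :: cs.takeWhile PySem.Chars.isdigit) ::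
        pvGroupDigits (cs.dropWhile PySem.Chars.isdigit)
    else
      pvGroupDigits cs
termination_by cs => cs.length
decreasing_by
  · simpa using Nat.lt_succ_of_le (List.length_dropWhile_le _ _)
  · simp

def extractIntegerWords_alt (s : String) : List String := pvGroupDigits s.toList

-- ===== PRECONDITION & SPEC =====
def Spec_extractIntegerWords (s : String) (out : List String) : Prop := out = extractIntegerWords_alt s
instance (s : String) (out : List String) : Decidable (Spec_extractIntegerWords s out) := by unfold Spec_extractIntegerWords; infer_instance

-- ===== CLAIM (what is proved, stated in full; the proofs are below) =====
def Claim_equal_extractIntegerWords : Prop := ∀ (s : String), Dom_extractIntegerWords s → Spec_extractIntegerWords s (extractIntegerWords s)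

-- ===== LEMMAS AND PROOFS =====

-- pvGroupDigits restated as: peel one (possibly empty) digit run, recurse on the rest.
theorem pvGroupDigits_run (cs : List Char) :
    pvGroupDigits cs =
      (if cs.takeWhile PySem.Chars.isdigit = [] then []
       else [String.ofList (cs.takeWhile PySem.Chars.isdigit)]) ++
      pvGroupDigits (cs.dropWhile PySem.Chars.isdigit) := by
  cases cs with
  | nil => simp [pvGroupDigits]
  | cons c cs =>
    by_cases h : PySem.Chars.isdigit c = true
    · simp [pvGroupDigits, h]
    · simp [pvGroupDigits, h]

-- the loop invariant: running A's fold from state (num, n) and applying the tail check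
-- yields num, then the pending run n merged with the leading digit run of cs, then the rest.
theorem pvFold_inv (cs : List Char) (num : List String) (n : List Char) :
    (let st := cs.foldl
        (fun (st : List String × List Char) i =>
          if PySem.Chars.isdigit i then (st.1, st.2 ++ [i])
          else if st.2 ≠ [] then (st.1 ++ [String.ofList st.2], [])
          else st)
        (num, n)
     if st.2 ≠ [] then st.1 ++ [String.ofList st.2] else st.1) =
    num ++
      ((if n ++ cs.takeWhile PySem.Chars.isdigit = [] then []
        else [String.ofList (n ++ cs.takeWhile PySem.Chars.isdigit)]) ++
       pvGroupDigits (cs.dropWhile PySem.Chars.isdigit)) := by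
  induction cs generalizing num n with
  | nil =>
    by_cases h : n = [] <;> simp [h, pvGroupDigits]
  | cons c cs ih =>
    by_cases h : PySem.Chars.isdigit c = true
    · simp only [List.foldl_cons, h, if_true, List.takeWhile_cons, List.dropWhile_cons]
      rw [ih num (n ++ [c])]
      simp [List.append_assoc]
    · have hrec : pvGroupDigits (c :: cs) = pvGroupDigits cs := by simp [pvGroupDigits, h]
      simp only [List.foldl_cons, h, List.takeWhile_cons, List.dropWhile_cons,
        Bool.false_eq_true, if_false, List.append_nil, hrec]
      by_cases hn : n = []
      · simp only [hn, ne_eq, not_true_eq_false, if_false, List.nil_append, if_true]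
        rw [pvGroupDigits_run cs]
        simpa using ih num []
      · simp only [ne_eq, hn, not_false_eq_true, if_true]
        rw [pvGroupDigits_run cs]
        have := ih (num ++ [String.ofList n]) []
        simp only [List.nil_append] at this
        rw [this, List.append_assoc]
        simp

-- ===== VERDICT (by name: the statement is the Claim_ definition above) =====
theorem extractIntegerWords_spec : Claim_equal_extractIntegerWords := by
  intro s _
  show _ = _
  unfold extractIntegerWords extractIntegerWords_alt
  have := pvFold_inv s.toList [] []
  simpa [pvGroupDigits_run s.toList] using this
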